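-- pv_equiv track=rewrite | github.com/CrowMother/unusual-options-scanner | modules/utils.py | extract_symbol_and_date
-- ===== SOURCE A (Python) =====
-- def extract_symbol_and_date(option_string):
--     """
--     Extracts the symbol and date (portion before the first 'C' or 'P' after numbers).
--
--     Args:
--         option_string (str): The option string to parse.
--
--     Returns:
--         str: The extracted symbol and date.
--     """
--     # Find position of the first number
--     first_number = next((i for i, char in enumerate(option_string) if char.isdigit()), None)
--
--     # Ensure we start searching for 'C' or 'P' only after the first number
--     if first_number is not None:
--         first_c_or_p = next((i + first_number for i, char in enumerate(option_string[first_number:])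
--                              if char in ['C', 'P']), None)
--
--         # Return the part of the string before 'C' or 'P'
--         if first_c_or_p is not None:
--             return option_string[:first_c_or_p + 1]
--
--     # Return the original string if no match
--     return option_string
-- ===== SOURCE B (Python) =====
-- def extract_symbol_and_date(option_string):
--     """Staged, loop-free version built on str.find: the first digit position is
--     the minimum of the find() results for the ten digit characters; the cut is
--     the minimum of find('C', start) and find('P', start)."""
--     hits = [p for p in (option_string.find(d) for d in "0123456789") if p != -1]
--     if not hits:
--         return option_string
--     start = min(hits)
--     cuts = [q for q in (option_string.find('C', start),
--                         option_string.find('P', start)) if q != -1]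
--     if not cuts:
--         return option_string
--     return option_string[:min(cuts) + 1]
-- ===== Notes on version B (the rewrite author's own statement) =====
-- stated objective: alternative
-- what changed: Replaces A's two enumerate-generator scans with a loop-free staged computation on str.find: the first digit position is the minimum of the ten per-digit find results, and the cut position is the minimum of the two per-marker find results from that start.
import Mathlib
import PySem

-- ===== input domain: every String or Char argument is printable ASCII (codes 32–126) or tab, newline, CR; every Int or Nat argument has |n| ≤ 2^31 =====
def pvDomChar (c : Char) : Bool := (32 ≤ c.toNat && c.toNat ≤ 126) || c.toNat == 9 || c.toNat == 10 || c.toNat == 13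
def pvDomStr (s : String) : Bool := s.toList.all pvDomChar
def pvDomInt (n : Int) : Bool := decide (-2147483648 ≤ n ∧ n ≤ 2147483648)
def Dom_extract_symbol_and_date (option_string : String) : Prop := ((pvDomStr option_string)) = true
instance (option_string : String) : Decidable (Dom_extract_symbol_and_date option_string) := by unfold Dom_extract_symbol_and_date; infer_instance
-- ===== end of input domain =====

-- B replaces A's enumerate-generator scans by a loop-free staged computation on str.find
-- (minimum of the ten per-digit finds, then minimum of the two per-marker finds from that start);
-- objective: alternative (a timing run measured B faster: str.find runs in C where A's generators loop in Python).

-- ===== PORT A =====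
-- next((i for i, char in enumerate(s) if char.isdigit()), None): first index with a digit.
def pvFindDigitA : List Char → Nat → Option Nat
  | [], _ => none
  | c :: rest, k => if PySem.Chars.isdigit c then some k else pvFindDigitA rest (k + 1)

-- next((i + first_number for i, char in enumerate(s[first_number:]) if char in ['C','P']), None):
-- scan of the slice, counter started at first_number so the yielded value is i + first_number.
def pvFindCPA : List Char → Nat → Option Nat
  | [], _ => none
  | c :: rest, k => if c == 'C' || c == 'P' then some k else pvFindCPA rest (k + 1)

def extract_symbol_and_date (option_string : String) : String :=
  let cs := option_string.toList
  match pvFindDigitA cs 0 with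
  | none => option_string
  | some fn =>
    match pvFindCPA (cs.drop fn) fn with          -- s[fn:] with fn : Nat in range = drop fn
    | none => option_string
    | some j => String.ofList (cs.take (j + 1))   -- s[:j+1] with 0 ≤ j+1 = take (j+1)

-- ===== PORT B =====
def extract_symbol_and_date_alt (option_string : String) : String :=
  let cs := option_string.toList
  -- hits = [p for p in (s.find(d) for d in "0123456789") if p != -1]
  let hits := (("0123456789".toList).map (fun d => PySem.Chars.find cs [d])).filter (fun p => p ≠ -1)
  -- if not hits: return s;  start = min(hits)   (min? [] = none ↔ the early return fires)
  match PySem.List.min? hits id with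
  | none => option_string
  | some start =>
    -- cuts = [q for q in (s.find('C', start), s.find('P', start)) if q != -1]
    let cuts := ([PySem.Chars.findFrom cs ['C'] start none,
                  PySem.Chars.findFrom cs ['P'] start none]).filter (fun q => q ≠ -1)
    -- if not cuts: return s;  return s[:min(cuts) + 1]
    match PySem.List.min? cuts id with
    | none => option_string
    | some q => String.ofList (cs.take (q + 1).toNat)   -- s[:q+1] with q ≥ 0 = take (q+1)

-- ===== PRECONDITION & SPEC =====
def Spec_extract_symbol_and_date (option_string : String) (out : String) : Prop := out = extract_symbol_and_date_alt option_string
instance (option_string : String) (out : String) : Decidable (Spec_extract_symbol_and_date option_string out) := by unfold Spec_extract_symbol_and_date; infer_instance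

-- ===== CLAIM (what is proved, stated in full; the proofs are below) =====
def Claim_equal_extract_symbol_and_date : Prop := ∀ (option_string : String), Dom_extract_symbol_and_date option_string → Spec_extract_symbol_and_date option_string (extract_symbol_and_date option_string)

-- ===== LEMMAS AND PROOFS =====

-- first index of l whose character satisfies p (proof-side canonical form of both scans)
def pvFirstIdx (p : Char → Bool) : List Char → Option Nat
  | [] => none
  | c :: r => if p c then some 0 else (pvFirstIdx p r).map (· + 1)

theorem firstIdx_none_iff (p : Char → Bool) (l : List Char) :
    pvFirstIdx p l = none ↔ ∀ c ∈ l, p c = false := by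
  induction l with
  | nil => simp [pvFirstIdx]
  | cons c r ih =>
    by_cases h : p c = true
    · exact iff_of_false (by simp [pvFirstIdx, h])
        (fun hall => by have := hall c (by simp); simp [this] at h)
    · simp only [Bool.not_eq_true] at h
      simp [pvFirstIdx, h, ih]

theorem firstIdx_some (p : Char → Bool) (l : List Char) (i : Nat)
    (h : pvFirstIdx p l = some i) :
    ∃ hi : i < l.length, p l[i] = true ∧ ∀ j (_ : j < i) (_ : j < l.length), p l[j] = false := by
  induction l generalizing i with
  | nil => simp [pvFirstIdx] at h
  | cons c r ih =>
    unfold pvFirstIdx at h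
    by_cases hc : p c = true
    · simp [hc] at h; subst h; exact ⟨by simp, by simpa using hc, by omega⟩
    · simp only [Bool.not_eq_true] at hc
      simp [hc] at h
      obtain ⟨i', hi', rfl⟩ := h
      obtain ⟨hlt, hp, hmin⟩ := ih i' hi'
      refine ⟨by simpa using Nat.succ_lt_succ hlt, by simpa using hp, ?_⟩
      intro j hj hjl
      cases j with
      | zero => simpa using hc
      | succ j => simpa using hmin j (by omega) (by simpa using Nat.lt_of_succ_lt_succ hjl)

theorem firstIdx_of_spec (p : Char → Bool) (l : List Char) (i : Nat)
    (hi : i < l.length) (hp : p l[i] = true)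
    (hmin : ∀ j (_ : j < i) (_ : j < l.length), p l[j] = false) :
    pvFirstIdx p l = some i := by
  induction l generalizing i with
  | nil => simp at hi
  | cons c r ih =>
    cases i with
    | zero => simp at hp; simp [pvFirstIdx, hp]
    | succ i =>
      have hc : p c = false := by simpa using hmin 0 (Nat.succ_pos _) (by simp)
      have := ih i (by simpa using Nat.lt_of_succ_lt_succ hi) (by simpa using hp)
        (fun j hj hjl => by simpa using hmin (j+1) (by omega) (by simpa using Nat.succ_lt_succ hjl))
      simp [pvFirstIdx, hc, this]

-- [d] is a prefix of l.drop j (j < len) iff l[j] = d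
theorem single_prefix_drop (l : List Char) (d : Char) (j : Nat) (hj : j < l.length) :
    [d] <+: l.drop j ↔ l[j] = d := by
  rw [List.drop_eq_getElem_cons hj]
  constructor
  · intro h
    rcases (List.cons_prefix_cons.mp h) with ⟨h1, _⟩; exact h1.symm
  · intro h; exact List.cons_prefix_cons.mpr ⟨h.symm, List.nil_prefix⟩

-- s.find(d) for a single character = pvFirstIdx of (· == d), with -1 for "absent"
theorem find_single (l : List Char) (d : Char) :
    PySem.Chars.find l [d] =
      match pvFirstIdx (fun c => c == d) l with
      | none => -1
      | some i => (i : Int) := by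
  cases hf : pvFirstIdx (fun c => c == d) l with
  | none =>
    have hnm : d ∉ l := by
      intro hm
      obtain ⟨j, hj, hje⟩ := List.mem_iff_getElem.mp hm
      have := (firstIdx_none_iff _ l).mp hf l[j] (List.getElem_mem hj)
      simp [hje] at this
    rw [PySem.Chars.find_eq_neg_one_iff]
    exact fun hinf => hnm (hinf.subset (by simp))
  | some i =>
    obtain ⟨hi, hp, hmin⟩ := firstIdx_some _ l i hf
    have hde : l[i] = d := by simpa using hp
    have hinf : [d] <:+: l :=
      (((single_prefix_drop l d i hi).mpr hde).isInfix).trans (List.drop_suffix i l).isInfix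
    have hnn : 0 ≤ PySem.Chars.find l [d] := (PySem.Chars.find_nonneg_iff l [d]).mpr hinf
    obtain ⟨hpre, hmin'⟩ := PySem.Chars.find_spec hnn
    set m := (PySem.Chars.find l [d]).toNat with hm
    have hml : m < l.length := by
      by_contra hge
      have : l.drop m = [] := List.drop_eq_nil_of_le (by omega)
      rw [this] at hpre; simp at hpre
    have hlm : l[m] = d := (single_prefix_drop l d m hml).mp hpre
    have hmi : m = i := by
      rcases Nat.lt_trichotomy m i with h | h | h
      · have := hmin m h hml; simp [hlm] at this
      · exact h
      · exact absurd ((single_prefix_drop l d i hi).mpr hde) (hmin' i h)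
    have : PySem.Chars.find l [d] = (m : Int) := by omega
    rw [this, hmi]

-- structural form of the foldl inside PySem.List.min? (for key = id on Int)
def pvMinFold : Option Int → List Int → Option Int
  | acc, [] => acc
  | none, x :: r => pvMinFold (some x) r
  | some m, x :: r => pvMinFold (if x < m then some x else some m) r

theorem foldl_min_gen (f : Option Int → Int → Option Int)
    (hf1 : ∀ x, f none x = some x)
    (hf2 : ∀ m x, f (some m) x = if x < m then some x else some m)
    (xs : List Int) (acc : Option Int) : List.foldl f acc xs = pvMinFold acc xs := by
  induction xs generalizing acc with
  | nil => cases acc <;> rfl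
  | cons x r ih =>
    cases acc with
    | none => rw [List.foldl_cons, hf1]; exact (ih (some x)).trans rfl
    | some m => rw [List.foldl_cons, hf2]; by_cases h : x < m <;> simp [pvMinFold, h, ih]

theorem min?_eq_minFold (xs : List Int) : PySem.List.min? xs id = pvMinFold none xs := by
  rw [PySem.List.min?]
  exact foldl_min_gen _ (fun x => rfl) (fun m x => rfl) xs none

theorem minFold_none_iff (xs : List Int) (acc : Option Int) :
    pvMinFold acc xs = none ↔ acc = none ∧ xs = [] := by
  cases xs with
  | nil => cases acc <;> simp [pvMinFold]
  | cons x r =>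
    constructor
    · intro h
      exfalso
      -- result of a fold starting from a `some` accumulator is never none
      have : ∀ (t : List Int) (m : Int), pvMinFold (some m) t ≠ none := by
        intro t
        induction t with
        | nil => intro m; simp [pvMinFold]
        | cons y u ihu =>
          intro m
          by_cases hy : y < m <;> simp [pvMinFold, hy] <;> exact ihu _
      cases acc with
      | none => exact this r x (by simpa [pvMinFold] using h)
      | some m => exact this (x :: r) m h
    · rintro ⟨_, h⟩; cases h

theorem minFold_le (xs : List Int) (acc : Option Int) (m : Int)
    (h : pvMinFold acc xs = some m) :
    (∀ x ∈ xs, m ≤ x) ∧ (∀ a, acc = some a → m ≤ a) := by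
  induction xs generalizing acc with
  | nil =>
    cases acc <;> simp [pvMinFold] at h <;> simp [h]
  | cons x r ih =>
    cases acc with
    | none =>
      obtain ⟨h1, h2⟩ := ih (some x) (by simpa [pvMinFold] using h)
      refine ⟨fun y hy => ?_, by simp⟩
      rcases List.mem_cons.mp hy with rfl | hy
      · exact h2 y rfl
      · exact h1 y hy
    | some a =>
      by_cases hx : x < a
      · obtain ⟨h1, h2⟩ := ih (some x) (by simpa [pvMinFold, hx] using h)
        refine ⟨fun y hy => ?_, fun b hb => ?_⟩
        · rcases List.mem_cons.mp hy with rfl | hy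
          · exact h2 y rfl
          · exact h1 y hy
        · injection hb with hb; subst hb; have h3 := h2 x rfl; omega
      · obtain ⟨h1, h2⟩ := ih (some a) (by simpa [pvMinFold, hx] using h)
        refine ⟨fun y hy => ?_, fun b hb => ?_⟩
        · rcases List.mem_cons.mp hy with rfl | hy
          · have := h2 a rfl; omega
          · exact h1 y hy
        · injection hb with hb; subst hb; exact h2 _ rfl
    
theorem minFold_mem (xs : List Int) (acc : Option Int) (m : Int)
    (h : pvMinFold acc xs = some m) : m ∈ xs ∨ acc = some m := by
  induction xs generalizing acc with
  | nil => cases acc <;> simp [pvMinFold] at h <;> simp [h]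
  | cons x r ih =>
    cases acc with
    | none =>
      rcases ih (some x) (by simpa [pvMinFold] using h) with hm | hm
      · exact Or.inl (by simp [hm])
      · injection hm with hm; exact Or.inl (by simp [hm])
    | some a =>
      by_cases hx : x < a
      · rcases ih (some x) (by simpa [pvMinFold, hx] using h) with hm | hm
        · exact Or.inl (by simp [hm])
        · injection hm with hm; exact Or.inl (by simp [hm])
      · rcases ih (some a) (by simpa [pvMinFold, hx] using h) with hm | hm
        · exact Or.inl (by simp [hm])
        · exact Or.inr hm

-- min? returns the minimum value when some element is a lower bound of the list
theorem min?_eq_of_mem_le (xs : List Int) (v : Int)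
    (hmem : v ∈ xs) (hle : ∀ x ∈ xs, v ≤ x) :
    PySem.List.min? xs id = some v := by
  rw [min?_eq_minFold]
  cases hres : pvMinFold none xs with
  | none =>
    obtain ⟨_, hnil⟩ := (minFold_none_iff xs none).mp hres
    rw [hnil] at hmem; simp at hmem
  | some m =>
    have hm_mem : m ∈ xs := by
      rcases minFold_mem xs none m hres with h | h
      · exact h
      · cases h
    have h1 : m ≤ v := (minFold_le xs none m hres).1 v hmem
    have h2 : v ≤ m := hle m hm_mem
    congr 1; omega

-- min? over a shifted list
theorem min?_map_add (k : Int) (xs : List Int) :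
    PySem.List.min? (xs.map (fun x => k + x)) id = (PySem.List.min? xs id).map (fun x => k + x) := by
  rw [min?_eq_minFold, min?_eq_minFold]
  suffices h : ∀ acc : Option Int,
      pvMinFold (acc.map (fun x => k + x)) (xs.map (fun x => k + x))
        = (pvMinFold acc xs).map (fun x => k + x) by
    simpa using h none
  intro acc
  induction xs generalizing acc with
  | nil => cases acc <;> simp [pvMinFold]
  | cons x r ih =>
    cases acc with
    | none => simpa [pvMinFold] using ih (some x)
    | some m =>
      by_cases hx : x < m
      · have hx' : k + x < k + m := by omega
        simpa [pvMinFold, hx, hx'] using ih (some x)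
      · have hx' : ¬ (k + x < k + m) := by omega
        simpa [pvMinFold, hx, hx'] using ih (some m)

-- THE CORE: B's "min of the single-character finds over alphabet S" computes the first
-- index whose character satisfies p, whenever p is membership in S.
theorem min_finds (l : List Char) (S : List Char) (p : Char → Bool)
    (hp : ∀ c, p c = true ↔ c ∈ S) :
    PySem.List.min? ((S.map (fun d => PySem.Chars.find l [d])).filter (fun x => x ≠ -1)) id
      = Option.map (Nat.cast : Nat → Int) (pvFirstIdx p l) := by
  cases hf : pvFirstIdx p l with
  | none =>
    have hall : ∀ c ∈ l, p c = false := (firstIdx_none_iff p l).mp hf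
    have hnil : (S.map (fun d => PySem.Chars.find l [d])).filter (fun x => x ≠ -1) = [] := by
      rw [List.filter_eq_nil_iff]
      intro x hx
      obtain ⟨d, hdS, rfl⟩ := List.mem_map.mp hx
      rw [find_single]
      cases hfd : pvFirstIdx (fun c => c == d) l with
      | none => simp
      | some j =>
        exfalso
        obtain ⟨hj, hpj, _⟩ := firstIdx_some _ l j hfd
        have hlj : l[j] = d := by simpa using hpj
        have : p l[j] = true := (hp l[j]).mpr (by rw [hlj]; exact hdS)
        rw [hall l[j] (List.getElem_mem hj)] at this; cases this
    rw [hnil, min?_eq_minFold]; simp [pvMinFold]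
  | some i =>
    obtain ⟨hi, hpi, hmin⟩ := firstIdx_some p l i hf
    have hd0S : l[i] ∈ S := (hp l[i]).mp hpi
    have hfind0 : PySem.Chars.find l [l[i]] = (i : Int) := by
      rw [find_single, firstIdx_of_spec (fun c => c == l[i]) l i hi (by simp)
        (fun j hj hjl => by
          by_contra hne
          simp only [Bool.not_eq_false, beq_iff_eq] at hne
          exact absurd ((hp l[j]).mpr (hne ▸ hd0S)) (by simp [hmin j hj hjl]))]
    have hmem : (i : Int) ∈ (S.map (fun d => PySem.Chars.find l [d])).filter (fun x => x ≠ -1) := by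
      rw [List.mem_filter]
      exact ⟨List.mem_map.mpr ⟨l[i], hd0S, hfind0⟩, by simp⟩
    have hlb : ∀ x ∈ (S.map (fun d => PySem.Chars.find l [d])).filter (fun x => x ≠ -1), (i : Int) ≤ x := by
      intro x hx
      obtain ⟨hxm, hxne⟩ := List.mem_filter.mp hx
      obtain ⟨d, hdS, rfl⟩ := List.mem_map.mp hxm
      rw [find_single] at hxne ⊢
      cases hfd : pvFirstIdx (fun c => c == d) l with
      | none => simp [hfd] at hxne
      | some j =>
        refine le_trans ?_ (le_of_eq rfl)
        show (i : Int) ≤ (j : Int)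
        obtain ⟨hj, hpj, _⟩ := firstIdx_some _ l j hfd
        have hljd : l[j] = d := by simpa using hpj
        have hpj' : p l[j] = true := (hp l[j]).mpr (hljd ▸ hdS)
        have : ¬ j < i := fun hlt => by simp [hmin j hlt hj] at hpj'
        omega
    rw [min?_eq_of_mem_le _ _ hmem hlb]; simp

-- A's scans in canonical form
theorem findDigitA_eq (l : List Char) (k : Nat) :
    pvFindDigitA l k = (pvFirstIdx PySem.Chars.isdigit l).map (fun i => k + i) := by
  induction l generalizing k with
  | nil => simp [pvFindDigitA, pvFirstIdx]
  | cons c r ih =>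
    by_cases h : PySem.Chars.isdigit c
    · simp [pvFindDigitA, pvFirstIdx, h]
    · simp only [Bool.not_eq_true] at h
      simp only [pvFindDigitA, pvFirstIdx, h, Bool.false_eq_true, if_false, ih, Option.map_map]
      cases pvFirstIdx PySem.Chars.isdigit r <;> simp <;> omega

theorem findCPA_eq (l : List Char) (k : Nat) :
    pvFindCPA l k = (pvFirstIdx (fun c => c == 'C' || c == 'P') l).map (fun i => k + i) := by
  induction l generalizing k with
  | nil => simp [pvFindCPA, pvFirstIdx]
  | cons c r ih =>
    by_cases h : (c == 'C' || c == 'P') = true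
    · simp [pvFindCPA, pvFirstIdx, h]
    · simp only [Bool.not_eq_true] at h
      simp only [pvFindCPA, pvFirstIdx, h, Bool.false_eq_true, if_false, ih, Option.map_map]
      cases pvFirstIdx (fun c => c == 'C' || c == 'P') r <;> simp <;> omega

-- isdigit is membership in "0123456789" (Lean-side isdigit is the ASCII test '0' ≤ c ≤ '9')
theorem isdigit_mem (c : Char) :
    PySem.Chars.isdigit c = true ↔ c ∈ "0123456789".toList := by
  have hle : ∀ d e : Char, (d ≤ e ↔ d.toNat ≤ e.toNat) := by
    intro d e; rw [Char.le_def, UInt32.le_iff_toNat_le]; exact Iff.rfl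
  have heqc : ∀ d : Char, c = d ↔ c.toNat = d.toNat := by
    intro d
    exact ⟨fun h => by rw [h], fun h => Char.ext (UInt32.toNat_inj.mp h)⟩
  have hL : "0123456789".toList = ['0','1','2','3','4','5','6','7','8','9'] := rfl
  rw [hL]
  simp only [PySem.Chars.isdigit, Bool.and_eq_true, decide_eq_true_eq,
    hle, List.mem_cons, List.not_mem_nil, or_false, heqc]
  have e0 : ('0').toNat = 48 := by decide
  have e1 : ('1').toNat = 49 := by decide
  have e2 : ('2').toNat = 50 := by decide
  have e3 : ('3').toNat = 51 := by decide
  have e4 : ('4').toNat = 52 := by decide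
  have e5 : ('5').toNat = 53 := by decide
  have e6 : ('6').toNat = 54 := by decide
  have e7 : ('7').toNat = 55 := by decide
  have e8 : ('8').toNat = 56 := by decide
  have e9 : ('9').toNat = 57 := by decide
  rw [e0, e1, e2, e3, e4, e5, e6, e7, e8, e9]
  omega

theorem cp_mem (c : Char) : (c == 'C' || c == 'P') = true ↔ c ∈ ['C', 'P'] := by
  simp

-- the CP part of B: the two findFrom calls, filtered, as a shifted find list on the suffix
theorem cuts_eq (cs : List Char) (k : Nat) (hk : k ≤ cs.length) :
    ([PySem.Chars.findFrom cs ['C'] (k : Int) none,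
      PySem.Chars.findFrom cs ['P'] (k : Int) none]).filter (fun q => q ≠ -1)
    = ((['C','P'].map (fun d => PySem.Chars.find (cs.drop k) [d])).filter (fun x => x ≠ -1)).map
        (fun x => (k : Int) + x) := by
  rw [PySem.Chars.findFrom_natCast cs ['C'] k hk, PySem.Chars.findFrom_natCast cs ['P'] k hk]
  have hC := PySem.Chars.neg_one_le_find (cs.drop k) ['C']
  have hP := PySem.Chars.neg_one_le_find (cs.drop k) ['P']
  have hsh : ∀ z : Int, -1 ≤ z → z ≠ -1 → ¬((k : Int) + z = -1) := by intro z h hne; omega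
  by_cases h1 : PySem.Chars.find (cs.drop k) ['C'] = -1
  · by_cases h2 : PySem.Chars.find (cs.drop k) ['P'] = -1
    · simp [List.filter, h1, h2]
    · simp [List.filter, h1, h2, hsh _ hP h2]
  · by_cases h2 : PySem.Chars.find (cs.drop k) ['P'] = -1
    · simp [List.filter, h1, h2, hsh _ hC h1]
    · simp [List.filter, h1, h2, hsh _ hC h1, hsh _ hP h2]

-- ===== VERDICT (by name: the statement is the Claim_ definition above) =====
theorem extract_symbol_and_date_spec : Claim_equal_extract_symbol_and_date := by
  intro s _
  unfold Spec_extract_symbol_and_date extract_symbol_and_date extract_symbol_and_date_alt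
  simp only
  rw [min_finds s.toList _ PySem.Chars.isdigit isdigit_mem, findDigitA_eq]
  cases hf : pvFirstIdx PySem.Chars.isdigit s.toList with
  | none => simp
  | some i =>
    obtain ⟨hi, _, _⟩ := firstIdx_some _ _ i hf
    simp only [Option.map_some, Nat.zero_add]
    rw [cuts_eq s.toList i (by omega), min?_map_add,
        min_finds (s.toList.drop i) ['C','P'] (fun c => c == 'C' || c == 'P') cp_mem,
        findCPA_eq]
    cases hcp : pvFirstIdx (fun c => c == 'C' || c == 'P') (s.toList.drop i) with
    | none => simp
    | some j =>
      simp only [Option.map_some]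
      congr 1
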